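-- pv_equiv track=rewrite | github.com/Harinisri012/Safe_step | utils/navigation_logic.py | navigation_logic
-- ===== SOURCE A (Python) =====
-- def assess_risk(direction, detected_objects):
--     risk_score = 0
--     for obj in detected_objects:
--         obj_position, obj_distance, obj_impact = obj
--         if direction == "left" and obj_position in ["left", "center"]:
--             risk_score += weighted_risk(obj_distance, obj_impact)
--         if direction == "right" and obj_position in ["right", "center"]:
--             risk_score += weighted_risk(obj_distance, obj_impact)
--     return risk_score
--
-- def weighted_risk(distance, impact):
--     if distance == "Very Near":
--         return impact * 3
--     elif distance == "Near":
--         return impact * 2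
--     elif distance == "Far":
--         return impact * 1
--     else:
--         return 0
--
-- def navigation_logic(detected_objects):
--     risk_scores = {"left": 0, "right": 0}
--     for obj_position, obj_distance, obj_impact in detected_objects:
--         if obj_position == "center" and obj_distance == "Very Near":
--             risk_scores["left"] += assess_risk("left", detected_objects)
--             risk_scores["right"] += assess_risk("right", detected_objects)
--             return "Move left" if risk_scores["left"] < risk_scores["right"] else "Move right"
--     return "Proceed Forward"
-- ===== SOURCE B (Python) =====
-- def navigation_logic(detected_objects):
--     left_risk = 0
--     right_risk = 0
--     triggered = False
--     for pos, dist, impact in detected_objects: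
--         w = 3 if dist == "Very Near" else 2 if dist == "Near" else 1 if dist == "Far" else 0
--         if pos in ("left", "center"):
--             left_risk += w * impact
--         if pos in ("right", "center"):
--             right_risk += w * impact
--         if pos == "center" and dist == "Very Near":
--             triggered = True
--     if not triggered:
--         return "Proceed Forward"
--     return "Move left" if left_risk < right_risk else "Move right"
-- ===== Notes on version B (the rewrite author's own statement) =====
-- stated objective: simpler
-- what changed: Single pass accumulating left/right weighted risks and a trigger flag, instead of A's trigger-scan that then calls assess_risk for two more full rescans of the list.
import Mathlib
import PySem

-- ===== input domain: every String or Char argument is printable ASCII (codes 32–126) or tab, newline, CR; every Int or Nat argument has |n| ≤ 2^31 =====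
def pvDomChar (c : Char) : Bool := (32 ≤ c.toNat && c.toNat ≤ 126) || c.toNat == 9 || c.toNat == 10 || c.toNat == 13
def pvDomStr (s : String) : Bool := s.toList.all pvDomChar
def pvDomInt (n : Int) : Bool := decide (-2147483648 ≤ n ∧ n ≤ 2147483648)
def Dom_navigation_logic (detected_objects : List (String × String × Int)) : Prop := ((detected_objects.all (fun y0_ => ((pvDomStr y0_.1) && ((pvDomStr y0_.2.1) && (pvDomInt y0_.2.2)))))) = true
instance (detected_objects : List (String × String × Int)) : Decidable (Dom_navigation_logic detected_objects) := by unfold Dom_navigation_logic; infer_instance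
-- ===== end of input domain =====

-- B replaces A's trigger-scan plus two full assess_risk rescans by one pass accumulating
-- left/right weighted risks and a trigger flag (objective: simpler, one traversal).

-- ===== PORT A =====
def weighted_risk (distance : String) (impact : Int) : Int :=
  if distance = "Very Near" then impact * 3
  else if distance = "Near" then impact * 2
  else if distance = "Far" then impact * 1
  else 0

def assess_risk (direction : String) (detected_objects : List (String × String × Int)) : Int :=
  detected_objects.foldl (fun risk_score obj =>
    let risk_score :=
      if direction = "left" ∧ (obj.1 = "left" ∨ obj.1 = "center") then
        risk_score + weighted_risk obj.2.1 obj.2.2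
      else risk_score
    if direction = "right" ∧ (obj.1 = "right" ∨ obj.1 = "center") then
      risk_score + weighted_risk obj.2.1 obj.2.2
    else risk_score) 0

-- A's loop with early return; `full` is the whole list assess_risk rescans.
def navLoopA (full : List (String × String × Int)) : List (String × String × Int) → String
  | [] => "Proceed Forward"
  | obj :: rest =>
    if obj.1 = "center" ∧ obj.2.1 = "Very Near" then
      if 0 + assess_risk "left" full < 0 + assess_risk "right" full then "Move left" else "Move right"
    else navLoopA full rest

def navigation_logic (detected_objects : List (String × String × Int)) : String :=
  navLoopA detected_objects detected_objects

-- ===== PORT B =====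
def navigation_logic_alt (detected_objects : List (String × String × Int)) : String :=
  let st := detected_objects.foldl (fun (st : Int × Int × Bool) obj =>
    let w : Int := if obj.2.1 = "Very Near" then 3 else if obj.2.1 = "Near" then 2
                   else if obj.2.1 = "Far" then 1 else 0
    let l := if obj.1 = "left" ∨ obj.1 = "center" then st.1 + w * obj.2.2 else st.1
    let r := if obj.1 = "right" ∨ obj.1 = "center" then st.2.1 + w * obj.2.2 else st.2.1
    let t := if obj.1 = "center" ∧ obj.2.1 = "Very Near" then true else st.2.2
    (l, r, t)) (0, 0, false)
  if st.2.2 = false then "Proceed Forward"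
  else if st.1 < st.2.1 then "Move left" else "Move right"

-- ===== PRECONDITION & SPEC =====
def Spec_navigation_logic (detected_objects : List (String × String × Int)) (out : String) : Prop := out = navigation_logic_alt detected_objects
instance (detected_objects : List (String × String × Int)) (out : String) : Decidable (Spec_navigation_logic detected_objects out) := by unfold Spec_navigation_logic; infer_instance

-- ===== CLAIM (what is proved, stated in full; the proofs are below) =====
def Claim_equal_navigation_logic : Prop := ∀ (detected_objects : List (String × String × Int)), Dom_navigation_logic detected_objects → Spec_navigation_logic detected_objects (navigation_logic detected_objects)

-- ===== LEMMAS AND PROOFS =====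

-- step function of B's fold, named for the proofs
def bStep (st : Int × Int × Bool) (obj : String × String × Int) : Int × Int × Bool :=
  let w : Int := if obj.2.1 = "Very Near" then 3 else if obj.2.1 = "Near" then 2
                 else if obj.2.1 = "Far" then 1 else 0
  let l := if obj.1 = "left" ∨ obj.1 = "center" then st.1 + w * obj.2.2 else st.1
  let r := if obj.1 = "right" ∨ obj.1 = "center" then st.2.1 + w * obj.2.2 else st.2.1
  let t := if obj.1 = "center" ∧ obj.2.1 = "Very Near" then true else st.2.2
  (l, r, t)

def trig (xs : List (String × String × Int)) : Bool :=
  xs.any (fun obj => obj.1 = "center" ∧ obj.2.1 = "Very Near")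

def gL (obj : String × String × Int) : Int :=
  if obj.1 = "left" ∨ obj.1 = "center" then weighted_risk obj.2.1 obj.2.2 else 0

def gR (obj : String × String × Int) : Int :=
  if obj.1 = "right" ∨ obj.1 = "center" then weighted_risk obj.2.1 obj.2.2 else 0

lemma bStep_fst (st : Int × Int × Bool) (obj : String × String × Int) :
    (bStep st obj).1 = st.1 + gL obj := by
  simp only [bStep, gL, weighted_risk]
  split_ifs <;> ring

lemma bStep_snd (st : Int × Int × Bool) (obj : String × String × Int) :
    (bStep st obj).2.1 = st.2.1 + gR obj := by
  simp only [bStep, gR, weighted_risk]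
  split_ifs <;> ring

lemma bStep_trd (st : Int × Int × Bool) (obj : String × String × Int) :
    (bStep st obj).2.2 = (st.2.2 || decide (obj.1 = "center" ∧ obj.2.1 = "Very Near")) := by
  simp only [bStep]
  split_ifs with h <;> simp [h]

lemma bFold_char (xs : List (String × String × Int)) (st : Int × Int × Bool) :
    xs.foldl bStep st =
      (st.1 + (xs.map gL).sum, st.2.1 + (xs.map gR).sum, st.2.2 || trig xs) := by
  induction xs generalizing st with
  | nil => simp [trig]
  | cons obj rest ih =>
    simp only [List.foldl_cons, ih, bStep_fst, bStep_snd, bStep_trd, List.map_cons,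
      List.sum_cons, trig, List.any_cons]
    refine Prod.ext (by ring) (Prod.ext (by ring) (by simp [Bool.or_assoc]))

lemma assess_left (xs : List (String × String × Int)) :
    assess_risk "left" xs = (xs.map gL).sum := by
  unfold assess_risk
  have h : (fun (risk_score : Int) (obj : String × String × Int) =>
      let risk_score :=
        if ("left" : String) = "left" ∧ (obj.1 = "left" ∨ obj.1 = "center") then
          risk_score + weighted_risk obj.2.1 obj.2.2
        else risk_score
      if ("left" : String) = "right" ∧ (obj.1 = "right" ∨ obj.1 = "center") then
        risk_score + weighted_risk obj.2.1 obj.2.2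
      else risk_score) = fun risk_score obj => risk_score + gL obj := by
    funext s obj
    simp only [gL]
    split_ifs <;> simp_all
  rw [h, PySem.List.foldl_add]
  simp

lemma assess_right (xs : List (String × String × Int)) :
    assess_risk "right" xs = (xs.map gR).sum := by
  unfold assess_risk
  have h : (fun (risk_score : Int) (obj : String × String × Int) =>
      let risk_score :=
        if ("right" : String) = "left" ∧ (obj.1 = "left" ∨ obj.1 = "center") then
          risk_score + weighted_risk obj.2.1 obj.2.2
        else risk_score
      if ("right" : String) = "right" ∧ (obj.1 = "right" ∨ obj.1 = "center") then
        risk_score + weighted_risk obj.2.1 obj.2.2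
      else risk_score) = fun risk_score obj => risk_score + gR obj := by
    funext s obj
    simp only [gR]
    split_ifs <;> simp_all
  rw [h, PySem.List.foldl_add]
  simp

lemma navLoopA_char (full rest : List (String × String × Int)) :
    navLoopA full rest =
      if trig rest then
        (if assess_risk "left" full < assess_risk "right" full then "Move left" else "Move right")
      else "Proceed Forward" := by
  induction rest with
  | nil => simp [navLoopA, trig]
  | cons obj r ih =>
    by_cases h : obj.1 = "center" ∧ obj.2.1 = "Very Near"
    · simp [navLoopA, h, trig]
    · rw [show navLoopA full (obj :: r) = navLoopA full r from by simp [navLoopA, h], ih]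
      have ht : trig (obj :: r) = trig r := by
        simp only [trig, List.any_cons, decide_eq_false h, Bool.false_or]
      rw [ht]

-- ===== VERDICT (by name: the statement is the Claim_ definition above) =====
theorem navigation_logic_spec : Claim_equal_navigation_logic := by
  intro xs _
  unfold Spec_navigation_logic navigation_logic navigation_logic_alt
  have hb : ∀ st, xs.foldl (fun (st : Int × Int × Bool) obj =>
      let w : Int := if obj.2.1 = "Very Near" then 3 else if obj.2.1 = "Near" then 2
                     else if obj.2.1 = "Far" then 1 else 0
      let l := if obj.1 = "left" ∨ obj.1 = "center" then st.1 + w * obj.2.2 else st.1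
      let r := if obj.1 = "right" ∨ obj.1 = "center" then st.2.1 + w * obj.2.2 else st.2.1
      let t := if obj.1 = "center" ∧ obj.2.1 = "Very Near" then true else st.2.2
      (l, r, t)) st = xs.foldl bStep st := by
    intro st; rfl
  rw [hb, bFold_char, navLoopA_char, assess_left, assess_right]
  by_cases h : trig xs = true <;> simp [h]
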